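-- pv_equiv track=rewrite | github.com/ce4os/AdventOfCode | 2015/day3.py | get_visitied_houses
-- ===== SOURCE A (Python) =====
-- def get_visitied_houses(moves: str) -> list:
--     """"""
--     coordinates = [0,0]
--     visited_houses = [(0,0)]
--     for move in moves:
--         if move == ">":
--             coordinates[0] += 1
--         elif move == "<":
--             coordinates[0] -= 1
--         elif move == "^":
--             coordinates[1] += 1
--         else:
--             coordinates[1] -= 1
--         visited_houses.append(tuple(coordinates))
--     return visited_houses
-- ===== SOURCE B (Python) =====
-- def _delta(c):
--     if c == ">":
--         return (1, 0)
--     if c == "<":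
--         return (-1, 0)
--     if c == "^":
--         return (0, 1)
--     return (0, -1)
--
-- def _visits(s):
--     # divide and conquer: positions of s = positions of left half,
--     # then positions of right half translated by the left half's endpoint
--     if len(s) <= 1:
--         return [(0, 0)] + [_delta(c) for c in s]
--     mid = len(s) // 2
--     left = _visits(s[:mid])
--     right = _visits(s[mid:])
--     px, py = left[-1]
--     return left + [(px + x, py + y) for x, y in right[1:]]
--
-- def get_visitied_houses(moves: str) -> list:
--     return _visits(moves)
-- ===== Notes on version B (the rewrite author's own statement) =====
-- stated objective: alternative
-- what changed: Replaces A's single imperative mutate-and-append pass with a divide-and-conquer recursion: split the moves in half, recursively compute each half's visited list from the origin, and translate the right half's positions by the left half's endpoint.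
import Mathlib
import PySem

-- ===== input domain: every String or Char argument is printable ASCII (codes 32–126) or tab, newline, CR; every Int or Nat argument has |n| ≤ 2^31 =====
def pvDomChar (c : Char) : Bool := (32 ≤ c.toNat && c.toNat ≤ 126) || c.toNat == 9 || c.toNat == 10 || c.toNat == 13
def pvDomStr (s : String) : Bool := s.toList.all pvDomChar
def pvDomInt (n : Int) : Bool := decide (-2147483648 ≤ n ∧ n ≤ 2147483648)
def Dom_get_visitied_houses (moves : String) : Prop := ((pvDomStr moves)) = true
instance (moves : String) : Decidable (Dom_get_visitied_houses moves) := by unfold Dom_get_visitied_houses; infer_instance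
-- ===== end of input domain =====

-- B replaces A's single mutate-and-append pass by a divide-and-conquer recursion
-- (halve the string, solve each half from the origin, translate the right half); alternative, same result.

-- ===== PORT A =====
-- state: (coordinates, visited_houses); appends tuple(coordinates) after each move
def get_visitied_houses (moves : String) : List (Int × Int) :=
  let step : ((Int × Int) × List (Int × Int)) → Char → ((Int × Int) × List (Int × Int)) :=
    fun st move =>
      let c := st.1
      let c' :=
        if move = '>' then (c.1 + 1, c.2)
        else if move = '<' then (c.1 - 1, c.2)
        else if move = '^' then (c.1, c.2 + 1)
        else (c.1, c.2 - 1)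
      (c', st.2 ++ [c'])
  (moves.toList.foldl step ((0, 0), [(0, 0)])).2

-- ===== PORT B =====
def pvDelta (c : Char) : Int × Int :=
  if c = '>' then (1, 0)
  else if c = '<' then (-1, 0)
  else if c = '^' then (0, 1)
  else (0, -1)

def pvTupleAdd (p d : Int × Int) : Int × Int := (p.1 + d.1, p.2 + d.2)

-- _visits: divide and conquer; 'left' is always nonempty, so left[-1] is ported as getLastD (0,0)
def pvVisits (s : List Char) : List (Int × Int) :=
  if h : s.length ≤ 1 then
    [(0, 0)] ++ s.map pvDelta
  else
    let mid := s.length / 2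
    let left := pvVisits (s.take mid)
    let right := pvVisits (s.drop mid)
    let p := left.getLastD (0, 0)
    left ++ (right.drop 1).map (fun q => pvTupleAdd p q)
termination_by s.length
decreasing_by
  · simp only [List.length_take]; omega
  · simp only [List.length_drop]; omega

def get_visitied_houses_alt (moves : String) : List (Int × Int) :=
  pvVisits moves.toList

-- ===== PRECONDITION & SPEC =====
def Spec_get_visitied_houses (moves : String) (out : List (Int × Int)) : Prop := out = get_visitied_houses_alt moves
instance (moves : String) (out : List (Int × Int)) : Decidable (Spec_get_visitied_houses moves out) := by unfold Spec_get_visitied_houses; infer_instance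

-- ===== CLAIM (what is proved, stated in full; the proofs are below) =====
def Claim_equal_get_visitied_houses : Prop := ∀ (moves : String), Dom_get_visitied_houses moves → Spec_get_visitied_houses moves (get_visitied_houses moves)

-- ===== LEMMAS AND PROOFS =====

theorem pvAdd_assoc (a b c : Int × Int) :
    pvTupleAdd (pvTupleAdd a b) c = pvTupleAdd a (pvTupleAdd b c) := by
  simp [pvTupleAdd]; constructor <;> ring

theorem pvAdd_zero (d : Int × Int) : pvTupleAdd (0, 0) d = d := by
  simp [pvTupleAdd]

-- A's branch result equals adding the delta
theorem pvStep_eq_add (c : Int × Int) (m : Char) :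
    (if m = '>' then (c.1 + 1, c.2)
     else if m = '<' then (c.1 - 1, c.2)
     else if m = '^' then (c.1, c.2 + 1)
     else (c.1, c.2 - 1)) = pvTupleAdd c (pvDelta m) := by
  simp only [pvDelta, pvTupleAdd]
  split_ifs <;> simp <;> omega

-- A's foldl produces the prefix-sum scan
theorem pvFoldl_eq_scanl (l : List Char) (c : Int × Int) (acc : List (Int × Int)) :
    (l.foldl (fun st move =>
        let c := st.1
        let c' :=
          if move = '>' then (c.1 + 1, c.2)
          else if move = '<' then (c.1 - 1, c.2)
          else if move = '^' then (c.1, c.2 + 1)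
          else (c.1, c.2 - 1)
        (c', st.2 ++ [c'])) (c, acc)).2
      = acc ++ (List.scanl pvTupleAdd c (l.map pvDelta)).drop 1 := by
  induction l generalizing c acc with
  | nil => simp
  | cons m l ih =>
    simp only [List.foldl_cons, List.map_cons, List.scanl_cons, List.drop_succ_cons]
    rw [ih, pvStep_eq_add]
    cases l.map pvDelta with
    | nil => simp
    | cons d ds => simp

-- a scan from c is the scan from the origin translated by c
theorem pvScanl_shift (ds : List (Int × Int)) (c : Int × Int) :
    List.scanl pvTupleAdd c ds = (List.scanl pvTupleAdd (0, 0) ds).map (pvTupleAdd c) := by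
  induction ds generalizing c with
  | nil => simp [pvTupleAdd]
  | cons d ds ih =>
    simp only [List.scanl_cons, List.map_cons]
    rw [ih (pvTupleAdd c d), ih (pvTupleAdd (0, 0) d), List.map_map, pvAdd_zero]
    congr 1
    · simp [pvTupleAdd]
    · congr 1
      funext x
      simp [Function.comp, pvAdd_assoc]

theorem pvGetLastD_scanl (l : List (Int × Int)) (b x : Int × Int) :
    (List.scanl pvTupleAdd b l).getLastD x = List.foldl pvTupleAdd b l := by
  induction l generalizing b x with
  | nil => simp
  | cons d l ih =>
    simp only [List.scanl_cons, List.getLastD_cons, List.foldl_cons]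
    cases h : List.scanl pvTupleAdd (pvTupleAdd b d) l with
    | nil => exact absurd h (by simp)
    | cons a as => rw [← h, ih]

theorem pvScanl_append (d1 d2 : List (Int × Int)) (c : Int × Int) :
    List.scanl pvTupleAdd c (d1 ++ d2)
      = List.scanl pvTupleAdd c d1
        ++ (List.scanl pvTupleAdd (List.foldl pvTupleAdd c d1) d2).drop 1 := by
  induction d1 generalizing c with
  | nil =>
    cases d2 with
    | nil => simp
    | cons d ds => simp
  | cons d d1 ih =>
    simp only [List.cons_append, List.scanl_cons, List.foldl_cons, List.cons_append]
    rw [ih]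

-- B's divide and conquer computes the same prefix-sum scan
theorem pvVisits_eq : ∀ (n : Nat) (l : List Char), l.length ≤ n →
    pvVisits l = List.scanl pvTupleAdd (0, 0) (l.map pvDelta) := by
  intro n
  induction n with
  | zero =>
    intro l hl
    have : l = [] := List.eq_nil_of_length_eq_zero (Nat.le_zero.mp hl)
    subst this
    simp [pvVisits]
  | succ n ih =>
    intro l hl
    by_cases h : l.length ≤ 1
    · rw [pvVisits]
      simp only [h, dite_true]
      cases l with
      | nil => simp
      | cons m t =>
        have : t = [] := by
          cases t with
          | nil => rfl
          | cons a b => simp at h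
        subst this
        simp [pvAdd_zero]
    · rw [pvVisits]
      simp only [h, dite_false]
      have hmid1 : 1 ≤ l.length / 2 := by omega
      have hmid2 : l.length / 2 < l.length := by omega
      have htake : (l.take (l.length / 2)).length ≤ n := by
        simp only [List.length_take]; omega
      have hdrop : (l.drop (l.length / 2)).length ≤ n := by
        simp only [List.length_drop]; omega
      rw [ih _ htake, ih _ hdrop]
      have hsplit : l.map pvDelta
          = (l.take (l.length / 2)).map pvDelta ++ (l.drop (l.length / 2)).map pvDelta := by
        rw [← List.map_append, List.take_append_drop]
      conv_rhs => rw [hsplit]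
      rw [pvScanl_append, pvGetLastD_scanl, pvScanl_shift _ (List.foldl pvTupleAdd (0, 0) _),
        ← List.map_drop]

-- ===== VERDICT (by name: the statement is the Claim_ definition above) =====
theorem get_visitied_houses_spec : Claim_equal_get_visitied_houses := by
  intro moves _
  unfold Spec_get_visitied_houses get_visitied_houses get_visitied_houses_alt
  rw [pvFoldl_eq_scanl, pvVisits_eq moves.toList.length moves.toList le_rfl]
  cases h : moves.toList.map pvDelta with
  | nil => simp
  | cons d ds => simp
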